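-- pv_equiv track=rewrite | github.com/t-tsekov/codefights-solutions | arcade/the-core/labyrinth-of-nested-loops/crosswordFormation.py | crosswordFormation
-- ===== SOURCE A (Python) =====
-- def crosswordFormation(words):
--
--     def numOfWays(top, bottom, left, right):
--         ans1 = 0
--         for i in range(len(top) - 1):
--             for j in range(i + 2, len(top)):
--                 for shift in range(j - len(bottom) + 1, i + 1):
--                     is1 = bottom[i - shift]
--                     is2 = bottom[j - shift]
--                     for l in range(1, min(len(left), len(right)) - 1):
--                         ansl = 0
--                         ansr = 0
--                         for k1 in range(len(left) - l - 1):
--                             k2 = k1 + l + 1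
--                             if top[i] == left[k1] and is1 == left[k2]:
--                                 ansl += 1
--                         for k1 in range(len(right) - l - 1):
--                             k2 = k1 + l + 1
--                             if top[j] == right[k1] and is2 == right[k2]:
--                                 ansr += 1
--                         ans1 += ansl * ansr
--         return ans1
--
--     ans = 0
--     for i in range(4):
--         for j in range(i + 1, 4):
--             other = [0, 0]
--             c = 0
--             for k in range(4):
--                 if k != i and k != j:
--                     other[c] = k
--                     c += 1
--             x, y = other[0], other[1]
--             ans += (numOfWays(words[i], words[j], words[x], words[y])
--                 + numOfWays(words[j], words[i], words[x], words[y])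
--                 + numOfWays(words[i], words[j], words[y], words[x])
--                 + numOfWays(words[j], words[i], words[y], words[x]))
--     return ans
-- ===== SOURCE B (Python) =====
-- def crosswordFormation(words):
--     # Precompute, per word, how many index pairs (k1, k2) carry each
--     # (char-at-k1, char-at-k2, gap) triple; the two innermost scans of the
--     # naive algorithm become dictionary lookups.
--
--     def pairCounts(s):
--         cnt = {}
--         n = len(s)
--         for k1 in range(n):
--             for k2 in range(k1 + 2, n):
--                 key = (s[k1], s[k2], k2 - k1 - 1)
--                 cnt[key] = cnt.get(key, 0) + 1
--         return cnt
--
--     def numOfWays(top, bottom, left, right):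
--         cl = pairCounts(left)
--         cr = pairCounts(right)
--         m = min(len(left), len(right))
--         total = 0
--         for i in range(len(top) - 1):
--             for j in range(i + 2, len(top)):
--                 for shift in range(j - len(bottom) + 1, i + 1):
--                     is1 = bottom[i - shift]
--                     is2 = bottom[j - shift]
--                     for l in range(1, m - 1):
--                         total += (cl.get((top[i], is1, l), 0)
--                                   * cr.get((top[j], is2, l), 0))
--         return total
--
--     ans = 0
--     for t in range(4):
--         for b in range(4):
--             if b == t:
--                 continue
--             for x in range(4):
--                 if x == t or x == b:
--                     continue
--                 y = 6 - t - b - x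
--                 ans += numOfWays(words[t], words[b], words[x], words[y])
--     return ans
-- ===== Notes on version B (the rewrite author's own statement) =====
-- stated objective: alternative
-- what changed: B precomputes, for the left and right words, a dictionary counting index pairs per (char,char,gap) triple, so the two innermost O(L) scans of A become dictionary lookups, and enumerates the 24 word-role assignments directly instead of A's pair-plus-mirror bookkeeping.
import Mathlib
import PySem

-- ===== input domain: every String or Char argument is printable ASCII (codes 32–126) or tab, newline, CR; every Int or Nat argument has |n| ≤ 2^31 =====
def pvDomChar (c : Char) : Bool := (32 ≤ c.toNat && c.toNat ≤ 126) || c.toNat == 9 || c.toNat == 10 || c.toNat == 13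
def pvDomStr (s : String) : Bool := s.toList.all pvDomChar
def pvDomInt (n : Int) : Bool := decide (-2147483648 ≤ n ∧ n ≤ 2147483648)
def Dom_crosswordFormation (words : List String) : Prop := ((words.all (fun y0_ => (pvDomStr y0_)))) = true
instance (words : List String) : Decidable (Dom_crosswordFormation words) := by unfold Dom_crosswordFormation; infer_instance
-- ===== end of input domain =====

-- B replaces A's two innermost character scans by lookups in a precomputed
-- (char, char, gap) → pair-count dictionary per word, and enumerates the 24
-- word-role assignments directly (alternative algorithm; not timing-verified).

-- ===== PORT A =====
-- indexing helper: all indices produced by the loops are in range, so the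
-- default of pyGetD is never read and the port is exact
def pvGet (s : List Char) (i : Int) : Char := PySem.List.pyGetD s i ' '

def pvGetW (words : List String) (i : Int) : List Char := (PySem.List.pyGetD words i "").toList

def numOfWaysA (top bottom left right : List Char) : Int :=
  (PySem.List.pyRange 0 ((top.length : Int) - 1) 1).foldl (fun ans1 i =>
    (PySem.List.pyRange (i + 2) (top.length : Int) 1).foldl (fun ans1 j =>
      (PySem.List.pyRange (j - (bottom.length : Int) + 1) (i + 1) 1).foldl (fun ans1 shift =>
        let is1 := pvGet bottom (i - shift)
        let is2 := pvGet bottom (j - shift)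
        (PySem.List.pyRange 1 (min (left.length : Int) (right.length : Int) - 1) 1).foldl (fun ans1 l =>
          let ansl := (PySem.List.pyRange 0 ((left.length : Int) - l - 1) 1).foldl (fun a k1 =>
            let k2 := k1 + l + 1
            if pvGet top i == pvGet left k1 && is1 == pvGet left k2 then a + 1 else a) 0
          let ansr := (PySem.List.pyRange 0 ((right.length : Int) - l - 1) 1).foldl (fun a k1 =>
            let k2 := k1 + l + 1
            if pvGet top j == pvGet right k1 && is2 == pvGet right k2 then a + 1 else a) 0
          ans1 + ansl * ansr) ans1) ans1) ans1) 0

def crosswordFormation (words : List String) : Int :=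
  (PySem.List.pyRange 0 4 1).foldl (fun ans i =>
    (PySem.List.pyRange (i + 1) 4 1).foldl (fun ans j =>
      let oc := (PySem.List.pyRange 0 4 1).foldl (fun (st : (Int × Int) × Int) k =>
        if k ≠ i ∧ k ≠ j then
          (if st.2 = 0 then ((k, st.1.2), st.2 + 1) else ((st.1.1, k), st.2 + 1))
        else st) ((0, 0), 0)
      let x := oc.1.1
      let y := oc.1.2
      ans + (numOfWaysA (pvGetW words i) (pvGetW words j) (pvGetW words x) (pvGetW words y)
           + numOfWaysA (pvGetW words j) (pvGetW words i) (pvGetW words x) (pvGetW words y)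
           + numOfWaysA (pvGetW words i) (pvGetW words j) (pvGetW words y) (pvGetW words x)
           + numOfWaysA (pvGetW words j) (pvGetW words i) (pvGetW words y) (pvGetW words x))) ans) 0

-- ===== PORT B =====
def pairCountsB (s : List Char) : PySem.Dict (Char × Char × Int) Int :=
  (PySem.List.pyRange 0 (s.length : Int) 1).foldl (fun d k1 =>
    (PySem.List.pyRange (k1 + 2) (s.length : Int) 1).foldl (fun d k2 =>
      let key := (pvGet s k1, pvGet s k2, k2 - k1 - 1)
      d.insert key (d.getD key 0 + 1)) d) PySem.Dict.empty

def numOfWaysB (top bottom left right : List Char) : Int :=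
  let cl := pairCountsB left
  let cr := pairCountsB right
  let m : Int := min (left.length : Int) (right.length : Int)
  (PySem.List.pyRange 0 ((top.length : Int) - 1) 1).foldl (fun total i =>
    (PySem.List.pyRange (i + 2) (top.length : Int) 1).foldl (fun total j =>
      (PySem.List.pyRange (j - (bottom.length : Int) + 1) (i + 1) 1).foldl (fun total shift =>
        let is1 := pvGet bottom (i - shift)
        let is2 := pvGet bottom (j - shift)
        (PySem.List.pyRange 1 (m - 1) 1).foldl (fun total l =>
          total + cl.getD (pvGet top i, is1, l) 0 * cr.getD (pvGet top j, is2, l) 0)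
          total) total) total) 0

def crosswordFormation_alt (words : List String) : Int :=
  (PySem.List.pyRange 0 4 1).foldl (fun ans t =>
    (PySem.List.pyRange 0 4 1).foldl (fun ans b =>
      if b = t then ans else
      (PySem.List.pyRange 0 4 1).foldl (fun ans x =>
        if x = t ∨ x = b then ans else
        let y := 6 - t - b - x
        ans + numOfWaysB (pvGetW words t) (pvGetW words b) (pvGetW words x) (pvGetW words y))
        ans) ans) 0

-- ===== PRECONDITION & SPEC =====
-- Pre_: A indexes words[0]..words[3], so it raises IndexError on lists of
-- fewer than four words; exactly those inputs are excluded.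
def Pre_crosswordFormation (words : List String) : Prop := 4 ≤ words.length
instance (words : List String) : Decidable (Pre_crosswordFormation words) := by unfold Pre_crosswordFormation; infer_instance
def pvWitness_crosswordFormation : List String := (["code", "beta", "care", "dear"])
def Spec_crosswordFormation (words : List String) (out : Int) : Prop := out = crosswordFormation_alt words
instance (words : List String) (out : Int) : Decidable (Spec_crosswordFormation words out) := by unfold Spec_crosswordFormation; infer_instance

-- ===== CLAIM (what is proved, stated in full; the proofs are below) =====
def Claim_equal_crosswordFormation : Prop := ∀ (words : List String), Dom_crosswordFormation words → Pre_crosswordFormation words → Spec_crosswordFormation words (crosswordFormation words)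

-- ===== LEMMAS AND PROOFS =====

-- the key list pairCountsB counts: one entry per index pair (k1, k2), k1 + 2 ≤ k2
def pairKeys (s : List Char) : List (Char × Char × Int) :=
  (PySem.List.pyRange 0 (s.length : Int) 1).flatMap (fun k1 =>
    (PySem.List.pyRange (k1 + 2) (s.length : Int) 1).map (fun k2 =>
      (pvGet s k1, pvGet s k2, k2 - k1 - 1)))

lemma countP_eq_ite_of_unique (l : List Int) (hnd : l.Nodup) (t : Int) (p : Int → Bool)
    (hp : ∀ x, p x = true → x = t) :
    l.countP p = if t ∈ l ∧ p t = true then 1 else 0 := by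
  induction l with
  | nil => simp
  | cons a l ih =>
    rcases List.nodup_cons.mp hnd with ⟨ha, hl⟩
    rw [List.countP_cons]
    by_cases hpa : p a = true
    · have hat : a = t := hp a hpa
      subst hat
      have : l.countP p = 0 := List.countP_eq_zero.mpr (fun x hx hpx => ha ((hp x hpx) ▸ hx))
      simp [this, hpa]
    · have hpa' : p a = false := by simpa using hpa
      rw [ih hl]
      have hta : (t ∈ a :: l ∧ p t = true) ↔ (t ∈ l ∧ p t = true) := by
        constructor
        · rintro ⟨hm, hpt⟩
          rcases List.mem_cons.mp hm with h | h
          · exact absurd (h ▸ hpt) hpa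
          · exact ⟨h, hpt⟩
        · rintro ⟨hm, hpt⟩
          exact ⟨List.mem_cons_of_mem _ hm, hpt⟩
      simp only [List.mem_cons] at hta
      simp [hpa', hta]

lemma pv_getD_double (L : List Int) (g : Int → List Int) (key : Int → Int → (Char × Char × Int))
    (d : PySem.Dict (Char × Char × Int) Int) (v : Char × Char × Int) :
    (L.foldl (fun d k1 => (g k1).foldl (fun d k2 => d.insert (key k1 k2) (d.getD (key k1 k2) 0 + 1)) d) d).getD v 0
      = d.getD v 0 + ((L.flatMap (fun k1 => (g k1).map (key k1))).count v : Int) := by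
  induction L generalizing d with
  | nil => simp
  | cons a L ih =>
    rw [List.foldl_cons, ih, List.flatMap_cons, List.count_append]
    have : ((g a).foldl (fun d k2 => d.insert (key a k2) (d.getD (key a k2) 0 + 1)) d)
        = (((g a).map (key a)).foldl (fun d x => d.insert x (d.getD x 0 + 1)) d) := by
      rw [List.foldl_map]
    rw [this, PySem.Dict.getD_foldl_insert_add_one]
    push_cast
    ring

lemma getD_pairCountsB (s : List Char) (v : Char × Char × Int) :
    (pairCountsB s).getD v 0 = ((pairKeys s).count v : Int) := by
  have h := pv_getD_double (PySem.List.pyRange 0 (s.length : Int) 1)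
    (fun k1 => PySem.List.pyRange (k1 + 2) (s.length : Int) 1)
    (fun k1 k2 => (pvGet s k1, pvGet s k2, k2 - k1 - 1)) PySem.Dict.empty v
  simpa [pairCountsB, pairKeys] using h

lemma lookup_eq_scan (s : List Char) (c1 c2 : Char) (l : Int) (hl : 1 ≤ l) :
    (pairCountsB s).getD (c1, c2, l) 0 =
      (PySem.List.pyRange 0 ((s.length : Int) - l - 1) 1).foldl (fun a k1 =>
        let k2 := k1 + l + 1
        if c1 == pvGet s k1 && c2 == pvGet s k2 then a + 1 else a) 0 := by
  rw [getD_pairCountsB]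
  have hR : (PySem.List.pyRange 0 ((s.length : Int) - l - 1) 1).foldl (fun a k1 =>
        let k2 := k1 + l + 1
        if c1 == pvGet s k1 && c2 == pvGet s k2 then a + 1 else a) 0
      = 0 + (((PySem.List.pyRange 0 ((s.length : Int) - l - 1) 1).countP
          (fun k1 => c1 == pvGet s k1 && c2 == pvGet s (k1 + l + 1)) : Nat) : Int) := by
    exact PySem.List.foldl_if_add_one _ _ _
  rw [hR, zero_add]
  congr 1
  -- Nat-level goal
  rw [pairKeys, List.count_flatMap]
  have hinner : ∀ k1 : Int,
      (((PySem.List.pyRange (k1 + 2) (s.length : Int) 1).map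
          (fun k2 => (pvGet s k1, pvGet s k2, k2 - k1 - 1))).count (c1, c2, l))
      = if ((decide (k1 + l + 1 < (s.length : Int))) &&
            (c1 == pvGet s k1 && c2 == pvGet s (k1 + l + 1))) = true then 1 else 0 := by
    intro k1
    rw [List.count, List.countP_map]
    rw [countP_eq_ite_of_unique _ (PySem.List.nodup_pyRange_one _ _) (k1 + l + 1) _ ?uniq]
    case uniq =>
      intro x hx
      simp only [Function.comp, beq_iff_eq, Prod.mk.injEq] at hx
      omega
    congr 1
    simp only [PySem.List.mem_pyRange_one, Function.comp, beq_iff_eq, Prod.mk.injEq,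
      Bool.and_eq_true, decide_eq_true_eq]
    rw [eq_iff_iff]
    constructor
    · rintro ⟨⟨h1, h2⟩, h3, h4, h5⟩
      exact ⟨h2, h3.symm, h4.symm⟩
    · rintro ⟨h2, hb1, hb2⟩
      exact ⟨⟨by omega, h2⟩, hb1.symm, hb2.symm, by ring⟩
  simp only [Function.comp_def, hinner]
  rw [PySem.List.sum_map_ite_one_zero_nat]
  by_cases hn : (s.length : Int) - l - 1 ≤ 0
  · rw [PySem.List.pyRange_one_eq_nil hn]
    simp only [List.countP_nil]
    apply List.countP_eq_zero.mpr
    intro k1 hk1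
    have h0 : (0:Int) ≤ k1 := (PySem.List.mem_pyRange_one.mp hk1).1
    simp only [Bool.and_eq_true, decide_eq_true_eq, not_and]
    intro hlt
    omega
  · rw [not_le] at hn
    rw [PySem.List.pyRange_one_append 0 ((s.length : Int) - l - 1) ((s.length : Int)) (by omega) (by omega),
      List.countP_append]
    have h2 : ((PySem.List.pyRange ((s.length : Int) - l - 1) ((s.length : Int)) 1).countP
        (fun k1 => decide (k1 + l + 1 < (s.length : Int)) && (c1 == pvGet s k1 && c2 == pvGet s (k1 + l + 1)))) = 0 := by
      apply List.countP_eq_zero.mpr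
      intro k1 hk1
      have := PySem.List.mem_pyRange_one.mp hk1
      simp only [Bool.and_eq_true, decide_eq_true_eq, not_and]
      intro hlt
      omega
    rw [h2, Nat.add_zero]
    apply List.countP_congr
    intro k1 hk1
    have := PySem.List.mem_pyRange_one.mp hk1
    have hd : decide (k1 + l + 1 < (s.length : Int)) = true := by
      simp only [decide_eq_true_eq]
      omega
    rw [hd, Bool.true_and]


lemma numOfWays_eq (top bottom left right : List Char) :
    numOfWaysB top bottom left right = numOfWaysA top bottom left right := by
  unfold numOfWaysA numOfWaysB
  apply PySem.List.foldl_congr_mem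
  intro acc i _
  apply PySem.List.foldl_congr_mem
  intro acc2 j _
  apply PySem.List.foldl_congr_mem
  intro acc3 shift _
  apply PySem.List.foldl_congr_mem
  intro acc4 ll hll
  have h1 : 1 ≤ ll := by
    have := PySem.List.mem_pyRange_one.mp hll
    omega
  rw [lookup_eq_scan _ _ _ _ h1, lookup_eq_scan _ _ _ _ h1]

-- ===== VERDICT (by name: the statement is the Claim_ definition above) =====
theorem crosswordFormation_spec : Claim_equal_crosswordFormation := by
  intro words _ _
  show crosswordFormation words = crosswordFormation_alt words
  have hA : crosswordFormation words = 0 + (numOfWaysA (pvGetW words 0) (pvGetW words 1) (pvGetW words 2) (pvGetW words 3) + numOfWaysA (pvGetW words 1) (pvGetW words 0) (pvGetW words 2) (pvGetW words 3) + numOfWaysA (pvGetW words 0) (pvGetW words 1) (pvGetW words 3) (pvGetW words 2) + numOfWaysA (pvGetW words 1) (pvGetW words 0) (pvGetW words 3) (pvGetW words 2)) + (numOfWaysA (pvGetW words 0) (pvGetW words 2) (pvGetW words 1) (pvGetW words 3) + numOfWaysA (pvGetW words 2) (pvGetW words 0) (pvGetW words 1) (pvGetW words 3) + numOfWaysA (pvGetW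 words 0) (pvGetW words 2) (pvGetW words 3) (pvGetW words 1) + numOfWaysA (pvGetW words 2) (pvGetW words 0) (pvGetW words 3) (pvGetW words 1)) + (numOfWaysA (pvGetW words 0) (pvGetW words 3) (pvGetW words 1) (pvGetW words 2) + numOfWaysA (pvGetW words 3) (pvGetW words 0) (pvGetW words 1) (pvGetW words 2) + numOfWaysA (pvGetW words 0) (pvGetW words 3) (pvGetW words 2) (pvGetW words 1) + numOfWaysA (pvGetW words 3) (pvGetW words 0) (pvGetW words 2) (pvGetW words 1)) + (numOfWaysA (pvGetW words 1) (pvGetW words 2) (pvGetW words 0) (pvGetW words 3) + numOfWaysA (pvGetW words 2) (pvGetW words 1) (pvGetW words 0) (pvGetW words 3) + numOfWaysA (pvGetW words 1) (pvGetW words 2) (pvGetW words 3) (pvGetW words 0) + numOfWaysA (pvGetW words 2) (pvGetW words 1) (pvGetW words 3) (pvGetW words 0)) + (numOfWaysA (pvGetW words 1) (pvGetW words 3) (pvGetW words 0) (pvGetW words 2) + numOfWaysA (pvGetW words 3) (pvGetW words 1) (pvGetW words 0) (pvGetW words 2) + numOfWaysA (pvGetW words 1) (pvGetW words 3) (pvGetW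 words 2) (pvGetW words 0) + numOfWaysA (pvGetW words 3) (pvGetW words 1) (pvGetW words 2) (pvGetW words 0)) + (numOfWaysA (pvGetW words 2) (pvGetW words 3) (pvGetW words 0) (pvGetW words 1) + numOfWaysA (pvGetW words 3) (pvGetW words 2) (pvGetW words 0) (pvGetW words 1) + numOfWaysA (pvGetW words 2) (pvGetW words 3) (pvGetW words 1) (pvGetW words 0) + numOfWaysA (pvGetW words 3) (pvGetW words 2) (pvGetW words 1) (pvGetW words 0)) := rfl
  have hB : crosswordFormation_alt words = 0 + numOfWaysB (pvGetW words 0) (pvGetW words 1) (pvGetW words 2) (pvGetW words 3) + numOfWaysB (pvGetW words 0) (pvGetW words 1) (pvGetW words 3) (pvGetW words 2) + numOfWaysB (pvGetW words 0) (pvGetW words 2) (pvGetW words 1) (pvGetW words 3) + numOfWaysB (pvGetW words 0) (pvGetW words 2) (pvGetW words 3) (pvGetW words 1) + numOfWaysB (pvGetW words 0) (pvGetW words 3) (pvGetW words 1) (pvGetW words 2) + numOfWaysB (pvGetW words 0) (pvGetW words 3) (pvGetW words 2) (pvGetW words 1) + numOfWaysB (pvGetW words 1) (pvGetW words 0) (pvGetW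 words 2) (pvGetW words 3) + numOfWaysB (pvGetW words 1) (pvGetW words 0) (pvGetW words 3) (pvGetW words 2) + numOfWaysB (pvGetW words 1) (pvGetW words 2) (pvGetW words 0) (pvGetW words 3) + numOfWaysB (pvGetW words 1) (pvGetW words 2) (pvGetW words 3) (pvGetW words 0) + numOfWaysB (pvGetW words 1) (pvGetW words 3) (pvGetW words 0) (pvGetW words 2) + numOfWaysB (pvGetW words 1) (pvGetW words 3) (pvGetW words 2) (pvGetW words 0) + numOfWaysB (pvGetW words 2) (pvGetW words 0) (pvGetW words 1) (pvGetW words 3) + numOfWaysB (pvGetW words 2) (pvGetW words 0) (pvGetW words 3) (pvGetW words 1) + numOfWaysB (pvGetW words 2) (pvGetW words 1) (pvGetW words 0) (pvGetW words 3) + numOfWaysB (pvGetW words 2) (pvGetW words 1) (pvGetW words 3) (pvGetW words 0) + numOfWaysB (pvGetW words 2) (pvGetW words 3) (pvGetW words 0) (pvGetW words 1) + numOfWaysB (pvGetW words 2) (pvGetW words 3) (pvGetW words 1) (pvGetW words 0) + numOfWaysB (pvGetW words 3) (pvGetW words 0) (pvGetW words 1) (pvGetW words 2) + numOfWaysB (pvGetW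 words 3) (pvGetW words 0) (pvGetW words 2) (pvGetW words 1) + numOfWaysB (pvGetW words 3) (pvGetW words 1) (pvGetW words 0) (pvGetW words 2) + numOfWaysB (pvGetW words 3) (pvGetW words 1) (pvGetW words 2) (pvGetW words 0) + numOfWaysB (pvGetW words 3) (pvGetW words 2) (pvGetW words 0) (pvGetW words 1) + numOfWaysB (pvGetW words 3) (pvGetW words 2) (pvGetW words 1) (pvGetW words 0) := rfl
  rw [hA, hB]
  simp only [numOfWays_eq]
  ring
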